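-- pv_equiv track=rewrite | github.com/HAYASAKA-Ryosuke/zamza | zamza/analysis.py | _main_separate
-- ===== SOURCE A (Python) =====
-- def _main_separate(code):
--     text = ""
--     main_line = False
--     for code_line in code.split('\n'):
--         if "end" in code_line and main_line:
--             text += code_line + '\n'
--             return text
--         elif "main:" in code_line:
--             main_line = True
--             text += code_line + '\n'
--         elif main_line:
--             text += code_line + '\n'
-- ===== SOURCE B (Python) =====
-- def _find(needle, lines):
--     for i, line in enumerate(lines):
--         if needle in line:
--             return i
--     return None
--
--
-- def _main_separate(code):
--     lines = code.split('\n')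
--     s = _find('main:', lines)
--     if s is None:
--         return None
--     k = _find('end', lines[s + 1:])
--     if k is None:
--         return None
--     return '\n'.join(lines[s:s + k + 2]) + '\n'
-- ===== Notes on version B (the rewrite author's own statement) =====
-- stated objective: alternative
-- what changed: Replaces A's flag-driven accumulating pass (building the text line by line with a main_line flag) by a locate-then-slice approach: find the first 'main:' line, find the first 'end' line strictly after it, and join that slice of lines.
import Mathlib
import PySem

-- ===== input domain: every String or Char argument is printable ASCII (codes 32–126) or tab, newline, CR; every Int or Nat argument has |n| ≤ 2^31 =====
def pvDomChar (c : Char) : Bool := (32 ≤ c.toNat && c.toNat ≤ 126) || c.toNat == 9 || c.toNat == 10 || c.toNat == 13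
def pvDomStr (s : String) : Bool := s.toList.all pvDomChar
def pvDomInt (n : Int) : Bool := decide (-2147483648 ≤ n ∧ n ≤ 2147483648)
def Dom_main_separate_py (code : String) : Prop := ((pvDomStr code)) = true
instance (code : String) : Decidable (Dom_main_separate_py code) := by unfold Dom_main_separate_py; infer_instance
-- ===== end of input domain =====

-- B replaces A's flag-driven accumulating pass by locate-the-region-then-slice-and-join (alternative decomposition, same cost).

-- ===== PORT A =====
-- the flag-driven loop: state = (accumulated text, main_line flag); returning inside the loop = some
def pvLoopA : List String → String → Bool → Option String
  | [], _, _ => none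
  | l :: ls, text, flag =>
    if PySem.Str.isIn "end" l && flag then some (text ++ l ++ "\n")
    else if PySem.Str.isIn "main:" l then pvLoopA ls (text ++ l ++ "\n") true
    else if flag then pvLoopA ls (text ++ l ++ "\n") flag
    else pvLoopA ls text flag

def main_separate_py (code : String) : Option String :=
  -- code.split('\n'): the separator is the nonempty literal "\n", so split? is always some; getD is exact
  pvLoopA ((PySem.Str.split? code "\n").getD []) "" false

-- ===== PORT B =====
-- _find(needle, lines): index of the first line containing needle, None if absent
def pvFindB (needle : String) : List String → Option Nat
  | [] => none
  | l :: ls => if PySem.Str.isIn needle l then some 0 else (pvFindB needle ls).map (· + 1)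

def main_separate_py_alt (code : String) : Option String :=
  let lines := (PySem.Str.split? code "\n").getD []
  match pvFindB "main:" lines with
  | none => none
  | some s =>
    match pvFindB "end" (lines.drop (s + 1)) with
    | none => none
    | some k => some (PySem.Str.join "\n" ((lines.drop s).take (k + 2)) ++ "\n")

-- ===== PRECONDITION & SPEC =====
def Spec_main_separate_py (code : String) (out : Option String) : Prop := out = main_separate_py_alt code
instance (code : String) (out : Option String) : Decidable (Spec_main_separate_py code out) := by unfold Spec_main_separate_py; infer_instance

-- ===== CLAIM (what is proved, stated in full; the proofs are below) =====
def Claim_equal_main_separate_py : Prop := ∀ (code : String), Dom_main_separate_py code → Spec_main_separate_py code (main_separate_py code)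

-- ===== LEMMAS AND PROOFS =====

theorem pvJoin_singleton (x : String) : PySem.Str.join "\n" [x] = x := by
  simp [PySem.Str.join, PySem.Chars.join, List.intercalate]

theorem pvJoin_cons_cons (x y : String) (ys : List String) :
    PySem.Str.join "\n" (x :: y :: ys) = x ++ "\n" ++ PySem.Str.join "\n" (y :: ys) := by
  simp only [PySem.Str.join, PySem.Chars.join, List.intercalate, List.map_cons,
    List.intersperse, List.flatten_cons]
  rw [String.ofList_append, String.ofList_append, String.ofList_toList, String.ofList_toList,
    String.append_assoc]

theorem pvFindB_ne_nil {n : String} {ls : List String} {k : Nat} (h : pvFindB n ls = some k) :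
    ls ≠ [] := by
  cases ls with
  | nil => simp [pvFindB] at h
  | cons l ls => simp

-- A's loop with the flag already set returns, for the first later 'end' line at offset k,
-- the accumulated text followed by the k+1 lines up to and including that line
theorem pvLoopA_true (ls : List String) : ∀ (t : String),
    pvLoopA ls t true =
      (pvFindB "end" ls).map (fun k => t ++ (PySem.Str.join "\n" (ls.take (k + 1)) ++ "\n")) := by
  induction ls with
  | nil => intro t; simp [pvLoopA, pvFindB]
  | cons l ls ih =>
    intro t
    by_cases he : PySem.Str.isIn "end" l = true
    · simp at he
      simp [pvLoopA, pvFindB, he, pvJoin_singleton, String.append_assoc]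
    · simp at he
      rw [show pvLoopA (l :: ls) t true = pvLoopA ls (t ++ l ++ "\n") true by
        simp [pvLoopA, he, String.append_assoc]]
      rw [ih]
      cases hf : pvFindB "end" ls with
      | none => simp [pvFindB, he, hf]
      | some k =>
        obtain ⟨a, as, rfl⟩ := List.exists_cons_of_ne_nil (pvFindB_ne_nil hf)
        have hcons : pvFindB "end" (l :: a :: as) = some (k + 1) := by
          rw [show pvFindB "end" (l :: a :: as)
              = if PySem.Str.isIn "end" l then some 0
                else (pvFindB "end" (a :: as)).map (· + 1) from rfl, hf]
          simp [he]
        rw [hcons]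
        simp [pvJoin_cons_cons, String.append_assoc]

-- A's loop with the flag still unset equals B's locate-then-slice-and-join computation
theorem pvLoopA_false (ls : List String) :
    pvLoopA ls "" false =
      (match pvFindB "main:" ls with
       | none => none
       | some s =>
         match pvFindB "end" (ls.drop (s + 1)) with
         | none => none
         | some k => some (PySem.Str.join "\n" ((ls.drop s).take (k + 2)) ++ "\n")) := by
  induction ls with
  | nil => simp [pvLoopA, pvFindB]
  | cons l ls ih =>
    by_cases hm : PySem.Str.isIn "main:" l = true
    · simp at hm
      rw [show pvLoopA (l :: ls) "" false = pvLoopA ls ("" ++ l ++ "\n") true by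
        simp [pvLoopA, hm]]
      rw [pvLoopA_true]
      cases hf : pvFindB "end" ls with
      | none => simp [pvFindB, hm, hf]
      | some k =>
        obtain ⟨a, as, rfl⟩ := List.exists_cons_of_ne_nil (pvFindB_ne_nil hf)
        have hmc : pvFindB "main:" (l :: a :: as) = some 0 := by simp [pvFindB, hm]
        rw [hmc]
        simp [hf, pvJoin_cons_cons, String.append_assoc]
    · simp at hm
      rw [show pvLoopA (l :: ls) "" false = pvLoopA ls "" false by simp [pvLoopA, hm]]
      rw [ih]
      have hmc : pvFindB "main:" (l :: ls) = (pvFindB "main:" ls).map (· + 1) := by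
        simp [pvFindB, hm]
      rw [hmc]
      cases hf : pvFindB "main:" ls with
      | none => simp
      | some s => simp

-- ===== VERDICT (by name: the statement is the Claim_ definition above) =====
theorem main_separate_py_spec : Claim_equal_main_separate_py := by
  intro code _
  unfold Spec_main_separate_py main_separate_py main_separate_py_alt
  exact pvLoopA_false _
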